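-- pv_equiv track=rewrite | github.com/divy-a/simpy-api | simpy_search.py | basic_search
-- ===== SOURCE A (Python) =====
-- def basic_search(data: list, query: str, max_results: int) -> list[int]:
--
--     starts_with_indices = []
--     contains_indices = []
--
--     for index, element in enumerate(data):
--         if len(starts_with_indices) == max_results:
--             break
--
--         element_lower = str(element).lower()
--
--         if element_lower.startswith(query):
--             starts_with_indices.append(index)
--
--         elif query in element_lower:
--             contains_indices.append(index)
--
--     return (starts_with_indices+contains_indices)[:max_results]
-- ===== SOURCE B (Python) =====
-- def basic_search(data: list, query: str, max_results: int) -> list[int]: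
--     lowers = [str(e).lower() for e in data]
--     starts = [i for i, s in enumerate(lowers) if s.startswith(query)]
--     contains = [i for i, s in enumerate(lowers)
--                 if not s.startswith(query) and query in s]
--     return (starts + contains)[:max_results]
-- ===== Notes on version B (the rewrite author's own statement) =====
-- stated objective: simpler
-- what changed: Replaces the single stateful loop with an early break by two independent comprehensions over the lowered data (prefix matches, then substring-only matches) followed by one final slice; the break is dropped, which is safe because the slice discards everything past max_results.
import Mathlib
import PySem

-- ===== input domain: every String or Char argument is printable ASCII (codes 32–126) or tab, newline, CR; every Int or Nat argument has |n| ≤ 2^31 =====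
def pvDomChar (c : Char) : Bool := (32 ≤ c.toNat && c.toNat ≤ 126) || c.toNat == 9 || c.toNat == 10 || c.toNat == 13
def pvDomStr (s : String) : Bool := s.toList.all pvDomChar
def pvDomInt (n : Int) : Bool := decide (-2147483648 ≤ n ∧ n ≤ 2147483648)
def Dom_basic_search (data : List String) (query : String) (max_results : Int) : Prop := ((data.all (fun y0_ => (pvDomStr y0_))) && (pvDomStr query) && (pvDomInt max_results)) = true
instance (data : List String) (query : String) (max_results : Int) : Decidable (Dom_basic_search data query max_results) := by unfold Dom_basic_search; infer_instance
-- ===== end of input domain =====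

-- B replaces A's single stateful loop with its early break by two independent filter passes
-- and one final slice (simpler decomposition; same asymptotic cost).


-- ===== PORT A =====
-- the for-loop of A: state (starts_with_indices, contains_indices), break when
-- len(starts_with_indices) == max_results, elif precedence preserved
def basic_search_loop (query : String) (max_results : Int) :
    List (Int × String) → List Int → List Int → List Int × List Int
  | [], s, c => (s, c)
  | (i, e) :: rest, s, c =>
    if (s.length : Int) = max_results then (s, c)
    else
      let element_lower := PySem.Str.lower e
      if PySem.Str.startswith element_lower query then
        basic_search_loop query max_results rest (s ++ [i]) c
      else if PySem.Str.isIn query element_lower then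
        basic_search_loop query max_results rest s (c ++ [i])
      else
        basic_search_loop query max_results rest s c

def basic_search (data : List String) (query : String) (max_results : Int) : List Int :=
  let r := basic_search_loop query max_results (PySem.List.enumerate data 0) [] []
  PySem.List.slice (r.1 ++ r.2) none (some max_results)

-- ===== PORT B =====
def basic_search_alt (data : List String) (query : String) (max_results : Int) : List Int :=
  let lowers := data.map PySem.Str.lower
  let starts := ((PySem.List.enumerate lowers 0).filter
      (fun p => PySem.Str.startswith p.2 query)).map (·.1)
  let contains := ((PySem.List.enumerate lowers 0).filter
      (fun p => !PySem.Str.startswith p.2 query && PySem.Str.isIn query p.2)).map (·.1)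
  PySem.List.slice (starts ++ contains) none (some max_results)

-- ===== PRECONDITION & SPEC =====
def Spec_basic_search (data : List String) (query : String) (max_results : Int) (out : List Int) : Prop := out = basic_search_alt data query max_results
instance (data : List String) (query : String) (max_results : Int) (out : List Int) : Decidable (Spec_basic_search data query max_results out) := by unfold Spec_basic_search; infer_instance

-- ===== CLAIM (what is proved, stated in full; the proofs are below) =====
def Claim_equal_basic_search : Prop := ∀ (data : List String) (query : String) (max_results : Int), Dom_basic_search data query max_results → Spec_basic_search data query max_results (basic_search data query max_results)

-- ===== LEMMAS AND PROOFS =====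

-- proof-side characterisation of the two buckets over an enumerated list
def selS (q : String) : List (Int × String) → List Int
  | [] => []
  | (i, e) :: l =>
    if PySem.Str.startswith (PySem.Str.lower e) q then i :: selS q l else selS q l

def selC (q : String) : List (Int × String) → List Int
  | [] => []
  | (i, e) :: l =>
    if PySem.Str.startswith (PySem.Str.lower e) q then selC q l
    else if PySem.Str.isIn q (PySem.Str.lower e) then i :: selC q l
    else selC q l

-- B's first comprehension equals selS over the un-lowered enumeration
theorem altS_eq (q : String) (data : List String) : ∀ k : Int,
    ((PySem.List.enumerate (data.map PySem.Str.lower) k).filter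
      (fun p => PySem.Str.startswith p.2 q)).map (·.1)
    = selS q (PySem.List.enumerate data k) := by
  induction data with
  | nil => intro k; simp [PySem.List.enumerate_nil, selS]
  | cons x xs ih =>
    intro k
    simp only [List.map_cons, PySem.List.enumerate_cons, List.filter_cons]
    have H := ih (k + 1)
    simp only [pysem] at H
    by_cases h : PySem.Chars.startswith (PySem.Chars.lower x.toList) q.toList = true
    · simp [selS, h, H]
    · simp [selS, h, H]

-- B's second comprehension equals selC over the un-lowered enumeration
theorem altC_eq (q : String) (data : List String) : ∀ k : Int,
    ((PySem.List.enumerate (data.map PySem.Str.lower) k).filter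
      (fun p => !PySem.Str.startswith p.2 q && PySem.Str.isIn q p.2)).map (·.1)
    = selC q (PySem.List.enumerate data k) := by
  induction data with
  | nil => intro k; simp [PySem.List.enumerate_nil, selC]
  | cons x xs ih =>
    intro k
    simp only [List.map_cons, PySem.List.enumerate_cons, List.filter_cons]
    have H := ih (k + 1)
    simp only [pysem] at H
    by_cases h : PySem.Chars.startswith (PySem.Chars.lower x.toList) q.toList = true
    · simp [selC, h, H]
    · by_cases h2 : PySem.Chars.isIn q.toList (PySem.Chars.lower x.toList) = true
      · simp [selC, h, h2, H]
      · simp [selC, h, h2, H]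

-- when max_results < 0 the break never fires: the loop collects everything
theorem loop_nobreak (q : String) (m : Int) (hm : m < 0) :
    ∀ (l : List (Int × String)) (s c : List Int),
      basic_search_loop q m l s c = (s ++ selS q l, c ++ selC q l) := by
  intro l
  induction l with
  | nil => intro s c; simp [basic_search_loop, selS, selC]
  | cons p l ih =>
    intro s c
    obtain ⟨i, e⟩ := p
    have hb : ¬ ((s.length : Int) = m) := by omega
    by_cases h : PySem.Chars.startswith (PySem.Chars.lower e.toList) q.toList = true
    · simp [basic_search_loop, hb, h, selS, selC, ih]
    · by_cases h2 : PySem.Chars.isIn q.toList (PySem.Chars.lower e.toList) = true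
      · simp [basic_search_loop, hb, h, h2, selS, selC, ih]
      · simp [basic_search_loop, hb, h, h2, selS, selC, ih]

-- when 0 ≤ max_results the early break is invisible after truncation to m
theorem loop_take (q : String) (m : Int) :
    ∀ (l : List (Int × String)) (s c : List Int), (s.length : Int) ≤ m →
      (((basic_search_loop q m l s c).1 ++ (basic_search_loop q m l s c).2).take m.toNat)
      = (((s ++ selS q l) ++ (c ++ selC q l)).take m.toNat) := by
  intro l
  induction l with
  | nil => intro s c _; simp [basic_search_loop, selS, selC]
  | cons p l ih =>
    intro s c hs
    obtain ⟨i, e⟩ := p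
    by_cases hb : (s.length : Int) = m
    · -- break: both sides truncate to the full s
      have hm : m.toNat = s.length := by omega
      have e1 : basic_search_loop q m ((i, e) :: l) s c = (s, c) := by
        simp [basic_search_loop, hb]
      rw [e1, hm, List.append_assoc s, List.take_left, List.take_left]
    · have hs' : ((s ++ [i]).length : Int) ≤ m := by simp; omega
      have e1 : basic_search_loop q m ((i, e) :: l) s c
          = if PySem.Str.startswith (PySem.Str.lower e) q then
              basic_search_loop q m l (s ++ [i]) c
            else if PySem.Str.isIn q (PySem.Str.lower e) then
              basic_search_loop q m l s (c ++ [i])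
            else basic_search_loop q m l s c := by
        simp [basic_search_loop, hb]
      rw [e1]
      by_cases h : PySem.Chars.startswith (PySem.Chars.lower e.toList) q.toList = true
      · have H := ih (s ++ [i]) c hs'
        simpa [h, selS, selC, List.append_assoc] using H
      · by_cases h2 : PySem.Chars.isIn q.toList (PySem.Chars.lower e.toList) = true
        · have H := ih s (c ++ [i]) hs
          simpa [h, h2, selS, selC, List.append_assoc] using H
        · have H := ih s c hs
          simpa [h, h2, selS, selC] using H

-- ===== VERDICT (by name: the statement is the Claim_ definition above) =====
theorem basic_search_spec : Claim_equal_basic_search := by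
  intro data q m _
  unfold Spec_basic_search basic_search basic_search_alt
  simp only [altS_eq, altC_eq]
  by_cases hm : 0 ≤ m
  · rw [PySem.List.slice_to _ hm, PySem.List.slice_to _ hm]
    have := loop_take q m (PySem.List.enumerate data 0) [] []
      (by simp; omega)
    simpa using this
  · rw [loop_nobreak q m (by omega)]
    simp
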